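-- pv_equiv track=rewrite | github.com/RahulReddy20/Truck_Delay_Classification | src/components/data_cleaning.py | categorize_time_of_day
-- ===== SOURCE A (Python) =====
-- def categorize_time_of_day(hour):
--     time_periods = {
--         (300, 600): 'Early Morning',
--         (600, 900): 'Morning',
--         (900, 1200): 'Late Morning',
--         (1200, 1500): 'Afternoon',
--         (1500, 1800): 'Late Afternoon',
--         (1800, 2100): 'Evening',
--         (2100, 2400): 'Night',
--         (0, 300): 'Late Night'
--     }
--
--     for (start, end), period in time_periods.items():
--         if start <= hour < end:
--             return period
--     return 'Invalid Hour'
-- ===== SOURCE B (Python) =====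
-- def categorize_time_of_day(hour):
--     periods = ['Late Night', 'Early Morning', 'Morning', 'Late Morning',
--                'Afternoon', 'Late Afternoon', 'Evening', 'Night']
--     if 0 <= hour < 2400:
--         return periods[hour // 300]
--     return 'Invalid Hour'
-- ===== Notes on version B (the rewrite author's own statement) =====
-- stated objective: simpler
-- what changed: Replaces the scan over eight interval/label pairs by a single arithmetic bucket index (hour // 300) into an ordered list, with one range guard for 'Invalid Hour'.
import Mathlib
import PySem

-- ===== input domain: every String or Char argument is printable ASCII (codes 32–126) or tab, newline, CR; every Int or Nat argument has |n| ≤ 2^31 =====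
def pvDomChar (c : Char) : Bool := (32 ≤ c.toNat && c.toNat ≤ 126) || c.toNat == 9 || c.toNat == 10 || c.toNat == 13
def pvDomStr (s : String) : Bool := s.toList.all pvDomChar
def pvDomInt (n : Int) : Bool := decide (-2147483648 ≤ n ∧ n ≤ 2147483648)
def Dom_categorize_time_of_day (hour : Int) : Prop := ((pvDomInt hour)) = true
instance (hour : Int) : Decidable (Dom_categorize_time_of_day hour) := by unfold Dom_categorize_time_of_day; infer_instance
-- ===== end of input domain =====

-- B replaces A's scan over eight interval/label pairs by one arithmetic bucket index (hour // 300) into an ordered list (simpler).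


-- ===== PORT A =====
-- literal port: the dict iteration becomes the same chain of interval tests, in insertion order
def categorize_time_of_day (hour : Int) : String :=
  if 300 ≤ hour ∧ hour < 600 then "Early Morning"
  else if 600 ≤ hour ∧ hour < 900 then "Morning"
  else if 900 ≤ hour ∧ hour < 1200 then "Late Morning"
  else if 1200 ≤ hour ∧ hour < 1500 then "Afternoon"
  else if 1500 ≤ hour ∧ hour < 1800 then "Late Afternoon"
  else if 1800 ≤ hour ∧ hour < 2100 then "Evening"
  else if 2100 ≤ hour ∧ hour < 2400 then "Night"
  else if 0 ≤ hour ∧ hour < 300 then "Late Night"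
  else "Invalid Hour"

-- ===== PORT B =====
def pvPeriods : List String :=
  ["Late Night", "Early Morning", "Morning", "Late Morning",
   "Afternoon", "Late Afternoon", "Evening", "Night"]

-- periods[hour // 300]; the guard guarantees the index is in range, so the default of pyGetD is never used
def categorize_time_of_day_alt (hour : Int) : String :=
  if 0 ≤ hour ∧ hour < 2400 then
    PySem.List.pyGetD pvPeriods (PySem.Int.floordiv hour 300) ""
  else "Invalid Hour"

-- ===== PRECONDITION & SPEC =====
def Spec_categorize_time_of_day (hour : Int) (out : String) : Prop := out = categorize_time_of_day_alt hour
instance (hour : Int) (out : String) : Decidable (Spec_categorize_time_of_day hour out) := by unfold Spec_categorize_time_of_day; infer_instance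

-- ===== CLAIM (what is proved, stated in full; the proofs are below) =====
def Claim_equal_categorize_time_of_day : Prop := ∀ (hour : Int), Dom_categorize_time_of_day hour → Spec_categorize_time_of_day hour (categorize_time_of_day hour)

-- ===== LEMMAS AND PROOFS =====
theorem pvFloordiv300 (hour k : Int) (h1 : 300 * k ≤ hour) (h2 : hour < 300 * (k + 1)) :
    PySem.Int.floordiv hour 300 = k := by
  rw [PySem.Int.floordiv_eq_iff_of_pos (by norm_num)]
  constructor <;> omega

theorem pvAltBucket (hour k : Int) (hk0 : 0 ≤ k) (hk8 : k < 8)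
    (h1 : 300 * k ≤ hour) (h2 : hour < 300 * (k + 1)) :
    categorize_time_of_day_alt hour = PySem.List.pyGetD pvPeriods k "" := by
  unfold categorize_time_of_day_alt
  rw [if_pos (by constructor <;> omega), pvFloordiv300 hour k h1 h2]

-- ===== VERDICT (by name: the statement is the Claim_ definition above) =====
theorem categorize_time_of_day_spec : Claim_equal_categorize_time_of_day := by
  intro hour _
  unfold Spec_categorize_time_of_day
  unfold categorize_time_of_day
  split_ifs with h1 h2 h3 h4 h5 h6 h7 h8
  · rw [pvAltBucket hour 1 (by norm_num) (by norm_num) (by omega) (by omega)]; decide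
  · rw [pvAltBucket hour 2 (by norm_num) (by norm_num) (by omega) (by omega)]; decide
  · rw [pvAltBucket hour 3 (by norm_num) (by norm_num) (by omega) (by omega)]; decide
  · rw [pvAltBucket hour 4 (by norm_num) (by norm_num) (by omega) (by omega)]; decide
  · rw [pvAltBucket hour 5 (by norm_num) (by norm_num) (by omega) (by omega)]; decide
  · rw [pvAltBucket hour 6 (by norm_num) (by norm_num) (by omega) (by omega)]; decide
  · rw [pvAltBucket hour 7 (by norm_num) (by norm_num) (by omega) (by omega)]; decide
  · rw [pvAltBucket hour 0 (by norm_num) (by norm_num) (by omega) (by omega)]; decide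
  · unfold categorize_time_of_day_alt
    rw [if_neg (by omega)]
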